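-- pv_equiv track=rewrite | github.com/cirosantilli/project-euler-solvers | solvers/242.py | f_small
-- ===== SOURCE A (Python) =====
-- from math import comb
--
-- def f_small(n: int, k: int) -> int:
--     """Exact f(n,k) for small n using the defining combinatorial sum."""
--     if k < 0 or k > n:
--         return 0
--     # odds: 1,3,5,... ; evens: 2,4,6,...
--     o = (n + 1) // 2
--     e = n // 2
--     total = 0
--     # odd sum <=> choose an odd number of odd elements
--     for j in range(1, k + 1, 2):
--         if j <= o and k - j <= e:
--             total += comb(o, j) * comb(e, k - j)
--     return total
-- ===== SOURCE B (Python) =====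
-- from math import comb
--
--
-- def f_small(n: int, k: int) -> int:
--     """Exact f(n,k) via the Vandermonde closed form.
--
--     Number of k-subsets of 1..n with odd sum = (C(n,k) - s) / 2, where
--     s = [t^k] (1-t)^o (1+t)^e = [t^k] (1-t^2)^e (1-t)^(n%2),
--     with o odds and e = n//2 evens among 1..n.
--     """
--     if k < 0 or k > n:
--         return 0
--     e = n // 2
--
--     def c(m: int) -> int:
--         # [t^m] (1 - t^2)^e  (0 for negative or odd m)
--         if m % 2 != 0:
--             return 0
--         return (-1) ** (m // 2) * comb(e, m // 2)
--
--     s = c(k) if n % 2 == 0 else c(k) - c(k - 1)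
--     return (comb(n, k) - s) // 2
-- ===== Notes on version B (the rewrite author's own statement) =====
-- stated objective: alternative
-- what changed: B replaces A's loop summing comb(o,j)*comb(e,k-j) over all odd j by the Vandermonde/alternating-convolution closed form (C(n,k) - [t^k](1-t^2)^(n//2)(1-t)^(n%2))/2, computed from at most three binomial coefficients.
import Mathlib
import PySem

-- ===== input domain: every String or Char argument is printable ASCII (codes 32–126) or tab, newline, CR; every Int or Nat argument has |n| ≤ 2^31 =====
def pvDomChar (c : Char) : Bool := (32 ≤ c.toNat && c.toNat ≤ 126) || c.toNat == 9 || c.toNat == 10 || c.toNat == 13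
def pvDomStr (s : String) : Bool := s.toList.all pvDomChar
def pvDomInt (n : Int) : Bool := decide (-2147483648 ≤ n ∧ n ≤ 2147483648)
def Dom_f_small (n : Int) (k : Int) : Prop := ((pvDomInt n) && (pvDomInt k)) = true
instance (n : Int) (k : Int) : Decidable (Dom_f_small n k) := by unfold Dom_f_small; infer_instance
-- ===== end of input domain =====

-- B computes the same count by the Vandermonde/alternating-convolution closed form
-- (C(n,k) - [t^k](1-t^2)^(n//2)(1-t)^(n%2)) / 2 instead of A's sum over odd j of
-- comb(o,j)*comb(e,k-j) (objective: alternative algorithm).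

-- math.comb for the nonnegative arguments both programs feed it
def pvComb (a : Int) (b : Int) : Int := ((a.toNat.choose b.toNat : Nat) : Int)

-- ===== PORT A =====
def f_small (n : Int) (k : Int) : Int :=
  if k < 0 ∨ k > n then 0
  else
    let o := PySem.Int.floordiv (n + 1) 2
    let e := PySem.Int.floordiv n 2
    (PySem.List.pyRange 1 (k + 1) 2).foldl
      (fun total j =>
        if j ≤ o ∧ k - j ≤ e then total + pvComb o j * pvComb e (k - j) else total) 0

-- ===== PORT B =====
-- helper c(m) = [t^m](1-t^2)^e
def pvCoeff (e : Int) (m : Int) : Int :=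
  if PySem.Int.mod m 2 ≠ 0 then 0
  else (-1) ^ (PySem.Int.floordiv m 2).toNat * pvComb e (PySem.Int.floordiv m 2)

def f_small_alt (n : Int) (k : Int) : Int :=
  if k < 0 ∨ k > n then 0
  else
    let e := PySem.Int.floordiv n 2
    let s := if PySem.Int.mod n 2 = 0 then pvCoeff e k
             else pvCoeff e k - pvCoeff e (k - 1)
    PySem.Int.floordiv (pvComb n k - s) 2

-- ===== PRECONDITION & SPEC =====
def Spec_f_small (n : Int) (k : Int) (out : Int) : Prop := out = f_small_alt n k
instance (n : Int) (k : Int) (out : Int) : Decidable (Spec_f_small n k out) := by unfold Spec_f_small; infer_instance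

-- ===== CLAIM (what is proved, stated in full; the proofs are below) =====
def Claim_equal_f_small : Prop := ∀ (n : Int) (k : Int), Dom_f_small n k → Spec_f_small n k (f_small n k)

-- ===== LEMMAS AND PROOFS =====

-- (a.choose b : ℤ)
def chZ (a b : Nat) : Int := ((a.choose b : Nat) : Int)

-- A's sum: odd-indexed terms of the Vandermonde convolution
def SZ (o e k : Nat) : Int := ∑ j ∈ Finset.range (k + 1), if j % 2 = 1 then chZ o j * chZ e (k - j) else 0

-- the alternating convolution [t^k](1-t)^o(1+t)^e
def AltZ (o e k : Nat) : Int := ∑ j ∈ Finset.range (k + 1), (-1 : Int) ^ j * chZ o j * chZ e (k - j)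

-- closed form for AltZ e e k = [t^k](1-t^2)^e
def C2Z (e k : Nat) : Int := if k % 2 = 0 then (-1 : Int) ^ (k / 2) * chZ e (k / 2) else 0

lemma vanderZ (o e k : Nat) :
    (∑ j ∈ Finset.range (k + 1), chZ o j * chZ e (k - j)) = chZ (o + e) k := by
  have h := Nat.add_choose_eq o e k
  rw [Finset.Nat.sum_antidiagonal_eq_sum_range_succ_mk] at h
  unfold chZ
  rw [h]
  push_cast
  rfl

lemma twoSZ (o e k : Nat) : 2 * SZ o e k = chZ (o + e) k - AltZ o e k := by
  rw [← vanderZ o e k]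
  unfold SZ AltZ
  rw [Finset.mul_sum, ← Finset.sum_sub_distrib]
  refine Finset.sum_congr rfl ?_
  intro j _
  rcases Nat.even_or_odd j with he | ho
  · have h0 : j % 2 = 0 := Nat.even_iff.mp he
    have h1 : ¬ (j % 2 = 1) := by omega
    rw [if_neg h1, he.neg_one_pow]
    ring
  · have h1 : j % 2 = 1 := Nat.odd_iff.mp ho
    rw [if_pos h1, ho.neg_one_pow]
    ring

lemma altZ_zero_right (o e : Nat) : AltZ o e 0 = 1 := by
  simp [AltZ, chZ]

lemma altZ_succ_right (o e m : Nat) : AltZ o (e + 1) (m + 1) = AltZ o e (m + 1) + AltZ o e m := by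
  have hsum : (∑ j ∈ Finset.range (m + 1), (-1 : Int) ^ j * chZ o j * chZ (e + 1) (m + 1 - j))
      = (∑ j ∈ Finset.range (m + 1), (-1 : Int) ^ j * chZ o j * chZ e (m + 1 - j))
        + ∑ j ∈ Finset.range (m + 1), (-1 : Int) ^ j * chZ o j * chZ e (m - j) := by
    rw [← Finset.sum_add_distrib]
    refine Finset.sum_congr rfl ?_
    intro j hj
    have hjm : j < m + 1 := Finset.mem_range.mp hj
    have hsub : m + 1 - j = (m - j) + 1 := by omega
    have hc : chZ (e + 1) (m + 1 - j) = chZ e (m - j) + chZ e (m + 1 - j) := by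
      unfold chZ
      rw [hsub, Nat.choose_succ_succ]
      push_cast
      ring
    rw [hc]
    ring
  unfold AltZ
  rw [Finset.sum_range_succ, Finset.sum_range_succ
    (f := fun j => (-1 : Int) ^ j * chZ o j * chZ e (m + 1 - j)), hsum]
  simp [chZ]
  ring

lemma altZ_expand (o e m : Nat) : AltZ o e (m + 1)
    = ∑ i ∈ Finset.range (m + 1), (-1 : Int) ^ (i + 1) * chZ o (i + 1) * chZ e (m - i) + chZ e (m + 1) := by
  unfold AltZ
  rw [Finset.sum_range_succ']
  congr 1
  · refine Finset.sum_congr rfl ?_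
    intro i _
    have h : m + 1 - (i + 1) = m - i := by omega
    rw [h]
  · simp [chZ]

lemma altZ_succ_left (o e m : Nat) : AltZ (o + 1) e (m + 1) = AltZ o e (m + 1) - AltZ o e m := by
  rw [altZ_expand (o + 1) e m]
  have pascal : ∀ i ∈ Finset.range (m + 1),
      (-1 : Int) ^ (i + 1) * chZ (o + 1) (i + 1) * chZ e (m - i)
        = (-((-1 : Int) ^ i * chZ o i * chZ e (m - i)))
          + ((-1 : Int) ^ (i + 1) * chZ o (i + 1) * chZ e (m - i)) := by
    intro i _
    have hc : chZ (o + 1) (i + 1) = chZ o i + chZ o (i + 1) := by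
      unfold chZ
      rw [Nat.choose_succ_succ]
      push_cast
      ring
    rw [hc, pow_succ]
    ring
  rw [Finset.sum_congr rfl pascal, Finset.sum_add_distrib]
  have h2 : (∑ i ∈ Finset.range (m + 1), -((-1 : Int) ^ i * chZ o i * chZ e (m - i))) = -AltZ o e m := by
    unfold AltZ
    rw [← Finset.sum_neg_distrib]
  have h3 : (∑ i ∈ Finset.range (m + 1), (-1 : Int) ^ (i + 1) * chZ o (i + 1) * chZ e (m - i))
      = AltZ o e (m + 1) - chZ e (m + 1) := by
    rw [altZ_expand o e m]
    ring
  rw [h2, h3]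
  ring

lemma c2Z_rec (e m : Nat) : C2Z (e + 1) (m + 2) = C2Z e (m + 2) - C2Z e m := by
  unfold C2Z
  by_cases hm : m % 2 = 0
  · have h2 : (m + 2) % 2 = 0 := by omega
    have hd : (m + 2) / 2 = m / 2 + 1 := by omega
    rw [if_pos h2, if_pos h2, if_pos hm, hd]
    have hc : chZ (e + 1) (m / 2 + 1) = chZ e (m / 2) + chZ e (m / 2 + 1) := by
      unfold chZ
      rw [Nat.choose_succ_succ]
      push_cast
      ring
    rw [hc, pow_succ]
    ring
  · have h2 : ¬ ((m + 2) % 2 = 0) := by omega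
    rw [if_neg h2, if_neg h2, if_neg hm]
    ring

lemma altZ_diag (e : Nat) : ∀ k, AltZ e e k = C2Z e k := by
  induction e with
  | zero =>
    intro k
    rcases k with _ | k'
    · simp [AltZ, C2Z, chZ]
    · have hL : AltZ 0 0 (k' + 1) = 0 := by
        unfold AltZ
        refine Finset.sum_eq_zero ?_
        intro j _
        rcases Nat.eq_zero_or_pos j with hj0 | hjp
        · subst hj0
          simp [chZ, Nat.choose_zero_succ]
        · have hz : (0 : Nat).choose j = 0 := Nat.choose_eq_zero_of_lt hjp
          simp [chZ, hz]
      rw [hL]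
      unfold C2Z
      split_ifs with hc
      · have hp : 0 < (k' + 1) / 2 := by omega
        have hz : (0 : Nat).choose ((k' + 1) / 2) = 0 := Nat.choose_eq_zero_of_lt hp
        simp [chZ, hz]
      · rfl
  | succ e ih =>
    intro k
    match k with
    | 0 =>
      rw [altZ_zero_right]
      simp [C2Z, chZ]
    | 1 =>
      have h1 := altZ_succ_right (e + 1) e 0
      have h2 := altZ_succ_left e e 0
      norm_num at h1 h2
      rw [h1, h2, ih 1, ih 0, altZ_zero_right]
      norm_num [C2Z, chZ]
    | (m + 2) =>
      have h12 : m + 1 + 1 = m + 2 := rfl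
      have h1 := altZ_succ_right (e + 1) e (m + 1)
      have h2 := altZ_succ_left e e (m + 1)
      have h3 := altZ_succ_left e e m
      rw [h12] at h1 h2
      rw [h1, h2, h3, ih (m + 2), ih (m + 1), ih m, c2Z_rec]
      ring

lemma altZ_offdiag (e k : Nat) :
    AltZ (e + 1) e k = C2Z e k - (if k = 0 then 0 else C2Z e (k - 1)) := by
  rcases k with _ | m
  · rw [altZ_zero_right]
    simp [C2Z, chZ]
  · rw [if_neg (Nat.succ_ne_zero m), altZ_succ_left, altZ_diag, altZ_diag]
    simp

lemma odd_sum_reindex (F : Nat → Int) (K : Nat) :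
    (∑ j ∈ Finset.range (K + 1), if j % 2 = 1 then F j else 0)
      = ∑ i ∈ Finset.range ((K + 1) / 2), F (2 * i + 1) := by
  induction K with
  | zero => simp
  | succ m ih =>
    rw [Finset.sum_range_succ, ih]
    by_cases hm : m % 2 = 0
    · have h1 : (m + 1) % 2 = 1 := by omega
      have h2 : (m + 1 + 1) / 2 = (m + 1) / 2 + 1 := by omega
      have h3 : 2 * ((m + 1) / 2) + 1 = m + 1 := by omega
      rw [if_pos h1, h2, Finset.sum_range_succ, h3]
    · have h1 : ¬ ((m + 1) % 2 = 1) := by omega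
      have h2 : (m + 1 + 1) / 2 = (m + 1) / 2 := by omega
      rw [if_neg h1, h2, add_zero]

lemma list_sum_map_range (f : Nat → Int) (n : Nat) :
    ((List.range n).map f).sum = ∑ i ∈ Finset.range n, f i := by
  induction n with
  | zero => simp
  | succ m ih => simp [List.range_succ, Finset.sum_range_succ, ih]

lemma pyRange_step2 (K : Nat) :
    PySem.List.pyRange 1 ((K : Int) + 1) 2
      = (List.range ((K + 1) / 2)).map (fun (i : Nat) => 1 + 2 * (i : Int)) := by
  rw [PySem.List.pyRange_of_pos _ _ (by norm_num : (0 : Int) < 2)]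
  by_cases hK : (1 : Int) < (K : Int) + 1
  · have hcnt : (((K : Int) + 1 - 1 + 2 - 1) / 2).toNat = (K + 1) / 2 := by omega
    rw [if_pos hK, hcnt]
  · rw [if_neg hK]
    have h0 : K = 0 := by omega
    subst h0
    simp

lemma pvComb_natCast (a b : Nat) : pvComb (a : Int) (b : Int) = chZ a b := by
  simp [pvComb, chZ]

lemma pvCoeff_natCast (E m : Nat) : pvCoeff (E : Int) (m : Int) = C2Z E m := by
  have h1 : PySem.Int.mod (m : Int) 2 = ((m % 2 : Nat) : Int) := by
    exact_mod_cast PySem.Int.mod_natCast m 2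
  have h2 : PySem.Int.floordiv (m : Int) 2 = ((m / 2 : Nat) : Int) := by
    exact_mod_cast PySem.Int.floordiv_natCast m 2
  unfold pvCoeff C2Z
  rw [h1, h2]
  by_cases hm : m % 2 = 0
  · rw [if_neg (by omega : ¬ (((m % 2 : Nat) : Int) ≠ 0)), if_pos hm, Int.toNat_natCast,
      pvComb_natCast]
  · rw [if_pos (by omega : ((m % 2 : Nat) : Int) ≠ 0), if_neg hm]

lemma pvCoeff_neg_one (E : Int) : pvCoeff E (-1) = 0 := by
  unfold pvCoeff
  rw [if_pos (by decide : PySem.Int.mod (-1) 2 ≠ 0)]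

lemma f_small_loop (N K : Nat) :
    f_small (N : Int) (K : Int) =
      if (K : Int) < 0 ∨ (K : Int) > (N : Int) then 0
      else SZ ((N + 1) / 2) (N / 2) K := by
  by_cases h : (K : Int) < 0 ∨ (K : Int) > (N : Int)
  · rw [if_pos h]
    unfold f_small
    rw [if_pos h]
  · rw [if_neg h]
    have ho : PySem.Int.floordiv ((N : Int) + 1) 2 = (((N + 1) / 2 : Nat) : Int) := by
      rw [show ((N : Int) + 1) = ((N + 1 : Nat) : Int) from by push_cast; ring]
      exact_mod_cast PySem.Int.floordiv_natCast (N + 1) 2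
    have he : PySem.Int.floordiv (N : Int) 2 = ((N / 2 : Nat) : Int) := by
      exact_mod_cast PySem.Int.floordiv_natCast N 2
    unfold f_small
    rw [if_neg h]
    show (PySem.List.pyRange 1 ((K : Int) + 1) 2).foldl
        (fun total j =>
          if j ≤ PySem.Int.floordiv ((N : Int) + 1) 2 ∧ (K : Int) - j ≤ PySem.Int.floordiv (N : Int) 2
          then total + pvComb (PySem.Int.floordiv ((N : Int) + 1) 2) j
                * pvComb (PySem.Int.floordiv (N : Int) 2) ((K : Int) - j)
          else total) 0
      = SZ ((N + 1) / 2) (N / 2) K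
    rw [ho, he]
    have hfold := PySem.List.foldl_congr_mem
      (PySem.List.pyRange 1 ((K : Int) + 1) 2)
      (fun total j =>
        if j ≤ (((N + 1) / 2 : Nat) : Int) ∧ (K : Int) - j ≤ ((N / 2 : Nat) : Int)
        then total + pvComb (((N + 1) / 2 : Nat) : Int) j * pvComb ((N / 2 : Nat) : Int) ((K : Int) - j)
        else total)
      (fun total j =>
        total + (if j ≤ (((N + 1) / 2 : Nat) : Int) ∧ (K : Int) - j ≤ ((N / 2 : Nat) : Int)
                 then pvComb (((N + 1) / 2 : Nat) : Int) j * pvComb ((N / 2 : Nat) : Int) ((K : Int) - j)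
                 else 0))
      0
      (by
        intro acc j _
        dsimp only
        split_ifs <;> simp)
    rw [hfold, PySem.List.foldl_add, pyRange_step2, List.map_map, list_sum_map_range, zero_add]
    unfold SZ
    rw [odd_sum_reindex (fun j => chZ ((N + 1) / 2) j * chZ (N / 2) (K - j)) K]
    refine Finset.sum_congr rfl ?_
    intro i hi
    simp only [Function.comp_apply]
    have hiK : 2 * i + 1 ≤ K := by
      have := Finset.mem_range.mp hi
      omega
    have hcast1 : (1 + 2 * (i : Int)) = ((2 * i + 1 : Nat) : Int) := by push_cast; ring
    have hcast2 : (K : Int) - ((2 * i + 1 : Nat) : Int) = ((K - (2 * i + 1) : Nat) : Int) :=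
      (Nat.cast_sub hiK).symm
    rw [hcast1, hcast2]
    by_cases hg : ((2 * i + 1 : Nat) : Int) ≤ (((N + 1) / 2 : Nat) : Int)
        ∧ ((K - (2 * i + 1) : Nat) : Int) ≤ ((N / 2 : Nat) : Int)
    · rw [if_pos hg, pvComb_natCast, pvComb_natCast]
    · rw [if_neg hg]
      rcases not_and_or.mp hg with hg1 | hg2
      · have hlt : (N + 1) / 2 < 2 * i + 1 := by exact_mod_cast not_le.mp hg1
        simp [chZ, Nat.choose_eq_zero_of_lt hlt]
      · have hlt : N / 2 < K - (2 * i + 1) := by exact_mod_cast not_le.mp hg2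
        simp [chZ, Nat.choose_eq_zero_of_lt hlt]

lemma f_small_alt_eval (N K : Nat) (h : K ≤ N) :
    f_small_alt (N : Int) (K : Int) =
      PySem.Int.floordiv (chZ N K - AltZ ((N + 1) / 2) (N / 2) K) 2 := by
  have hno : ¬ ((K : Int) < 0 ∨ (K : Int) > (N : Int)) := by omega
  have he : PySem.Int.floordiv (N : Int) 2 = ((N / 2 : Nat) : Int) := by
    exact_mod_cast PySem.Int.floordiv_natCast N 2
  have hmod : PySem.Int.mod (N : Int) 2 = ((N % 2 : Nat) : Int) := by
    exact_mod_cast PySem.Int.mod_natCast N 2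
  unfold f_small_alt
  rw [if_neg hno]
  show PySem.Int.floordiv
      (pvComb (N : Int) (K : Int) -
        (if PySem.Int.mod (N : Int) 2 = 0 then pvCoeff (PySem.Int.floordiv (N : Int) 2) (K : Int)
         else pvCoeff (PySem.Int.floordiv (N : Int) 2) (K : Int)
              - pvCoeff (PySem.Int.floordiv (N : Int) 2) ((K : Int) - 1))) 2
    = PySem.Int.floordiv (chZ N K - AltZ ((N + 1) / 2) (N / 2) K) 2
  rw [he, hmod, pvComb_natCast]
  by_cases hN : N % 2 = 0
  · have hOE : (N + 1) / 2 = N / 2 := by omega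
    rw [if_pos (by omega : ((N % 2 : Nat) : Int) = 0), pvCoeff_natCast, hOE, altZ_diag]
  · have hOE : (N + 1) / 2 = N / 2 + 1 := by omega
    have hc1 : pvCoeff ((N / 2 : Nat) : Int) ((K : Int) - 1)
        = (if K = 0 then 0 else C2Z (N / 2) (K - 1)) := by
      rcases K with _ | K'
      · rw [if_pos rfl]
        norm_num [pvCoeff_neg_one]
      · rw [if_neg (Nat.succ_ne_zero K'),
          show ((K' + 1 : Nat) : Int) - 1 = ((K' : Nat) : Int) from by push_cast; ring,
          pvCoeff_natCast]
        norm_num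
    rw [if_neg (by omega : ¬ ((N % 2 : Nat) : Int) = 0), pvCoeff_natCast, hc1, hOE, altZ_offdiag]

-- ===== VERDICT (by name: the statement is the Claim_ definition above) =====
theorem f_small_spec : Claim_equal_f_small := by
  intro n k _
  unfold Spec_f_small
  by_cases h : k < 0 ∨ k > n
  · unfold f_small f_small_alt
    rw [if_pos h, if_pos h]
  · have hk : 0 ≤ k := by omega
    have hkn : k ≤ n := by omega
    have hn : 0 ≤ n := le_trans hk hkn
    obtain ⟨N, rfl⟩ : ∃ N : Nat, n = (N : Int) := ⟨n.toNat, (Int.toNat_of_nonneg hn).symm⟩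
    obtain ⟨K, rfl⟩ : ∃ K : Nat, k = (K : Int) := ⟨k.toNat, (Int.toNat_of_nonneg hk).symm⟩
    have hKN : K ≤ N := by omega
    have hno : ¬ ((K : Int) < 0 ∨ (K : Int) > (N : Int)) := by omega
    rw [f_small_loop, if_neg hno, f_small_alt_eval N K hKN]
    have hOE : (N + 1) / 2 + N / 2 = N := by omega
    have h2S := twoSZ ((N + 1) / 2) (N / 2) K
    rw [hOE] at h2S
    rw [show chZ N K - AltZ ((N + 1) / 2) (N / 2) K = 2 * SZ ((N + 1) / 2) (N / 2) K from by
        linarith,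
      PySem.Int.floordiv_eq_ediv_of_pos (by norm_num)]
    exact (Int.mul_ediv_cancel_left _ (by norm_num)).symm
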